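-- pv_equiv track=rewrite | github.com/SmashingBumpkin/Python | exam_sim/program.py | string_conc
-- ===== SOURCE A (Python) =====
-- def string_conc(strings, originals, n):
--     if n == 1:
--         return strings
--     newStrs = []
--     for string in strings:
--         for original in originals:
--             if original not in string:
--                 newStrs.append(string + original)
--     return string_conc(newStrs, originals, n-1)
-- ===== SOURCE B (Python) =====
-- def string_conc(strings, originals, n):
--     cur = strings
--     for _ in range(n - 1):
--         cur = [s + o for s in cur for o in originals if o not in s]
--     return cur
-- ===== Notes on version B (the rewrite author's own statement) =====
-- stated objective: idiomatic
-- what changed: The tail recursion is replaced by a bounded for-loop over range(n-1) that rebuilds the list with a single comprehension each round, instead of recursing with hand-built nested append loops.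
import Mathlib
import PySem

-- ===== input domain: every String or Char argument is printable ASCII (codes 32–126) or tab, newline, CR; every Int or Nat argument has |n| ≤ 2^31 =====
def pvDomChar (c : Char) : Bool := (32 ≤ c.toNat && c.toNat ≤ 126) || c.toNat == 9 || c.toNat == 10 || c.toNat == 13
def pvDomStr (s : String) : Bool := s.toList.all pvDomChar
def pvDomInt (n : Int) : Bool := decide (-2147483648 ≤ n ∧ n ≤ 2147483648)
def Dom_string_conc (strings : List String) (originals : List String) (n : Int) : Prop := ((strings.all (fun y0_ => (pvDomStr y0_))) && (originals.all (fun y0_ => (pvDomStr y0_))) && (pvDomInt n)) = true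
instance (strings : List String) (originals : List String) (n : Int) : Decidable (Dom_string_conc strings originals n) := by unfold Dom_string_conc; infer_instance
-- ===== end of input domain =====

-- B replaces A's tail recursion with a bounded for-loop and a list comprehension (idiomatic; same cost).

-- ===== PORT A =====
-- Literal port of A. The 'n < 1' branch is a totality guard only: there the Python
-- recurses without bound (RecursionError), and Pre_string_conc excludes those inputs.
def string_conc (strings : List String) (originals : List String) (n : Int) : List String :=
  if n == 1 then strings
  else if n < 1 then strings  -- divergence guard (outside Pre_string_conc)
  else
    let newStrs := strings.foldl (fun acc string =>
      originals.foldl (fun acc2 original =>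
        if !(PySem.Str.isIn original string) then acc2 ++ [string ++ original] else acc2) acc) []
    string_conc newStrs originals (n - 1)
termination_by n.toNat
decreasing_by simp only [not_lt] at *; omega

-- ===== PORT B =====
-- one round: [s + o for s in cur for o in originals if o not in s]
def pvStep (originals : List String) (cur : List String) : List String :=
  cur.flatMap (fun s => (originals.filter (fun o => !(PySem.Str.isIn o s))).map (fun o => s ++ o))

-- B: cur = strings; for _ in range(n-1): cur = pvStep originals cur; return cur
def string_conc_alt (strings : List String) (originals : List String) (n : Int) : List String :=
  (pvStep originals)^[(n - 1).toNat] strings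

-- ===== PRECONDITION & SPEC =====
-- Pre_ excludes exactly n ≤ 0, where A recurses without bound and raises RecursionError.
def Pre_string_conc (strings : List String) (originals : List String) (n : Int) : Prop := 1 ≤ n
instance (strings : List String) (originals : List String) (n : Int) : Decidable (Pre_string_conc strings originals n) := by unfold Pre_string_conc; infer_instance

def pvWitness_string_conc : List String × List String × Int := (["ab"], ["c", "a"], 2)

def Spec_string_conc (strings : List String) (originals : List String) (n : Int) (out : List String) : Prop := out = string_conc_alt strings originals n
instance (strings : List String) (originals : List String) (n : Int) (out : List String) : Decidable (Spec_string_conc strings originals n out) := by unfold Spec_string_conc; infer_instance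

-- ===== CLAIM (what is proved, stated in full; the proofs are below) =====
def Claim_equal_string_conc : Prop := ∀ (strings : List String) (originals : List String) (n : Int), Dom_string_conc strings originals n → Pre_string_conc strings originals n → Spec_string_conc strings originals n (string_conc strings originals n)

-- ===== LEMMAS AND PROOFS =====

-- A's nested append loops build exactly one comprehension round of B.
lemma newStrs_eq_step (strings originals : List String) :
    strings.foldl (fun acc string =>
      originals.foldl (fun acc2 original =>
        if !(PySem.Str.isIn original string) then acc2 ++ [string ++ original] else acc2) acc) []
    = pvStep originals strings := by
  have inner : ∀ (s : String) (acc : List String),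
      originals.foldl (fun acc2 original =>
        if !(PySem.Str.isIn original s) then acc2 ++ [s ++ original] else acc2) acc
      = acc ++ (originals.filter (fun o => !(PySem.Str.isIn o s))).map (fun o => s ++ o) := by
    intro s acc
    exact PySem.List.foldl_append_if (p := fun o => !(PySem.Str.isIn o s)) (f := fun o => s ++ o)
      (l := originals) (acc := acc)
  calc strings.foldl (fun acc string =>
        originals.foldl (fun acc2 original =>
          if !(PySem.Str.isIn original string) then acc2 ++ [string ++ original] else acc2) acc) []
      = strings.foldl (fun acc s =>
          acc ++ (originals.filter (fun o => !(PySem.Str.isIn o s))).map (fun o => s ++ o)) [] := by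
        apply PySem.List.foldl_congr_mem
        intro acc s _
        exact inner s acc
    _ = pvStep originals strings := by
        rw [PySem.List.foldl_append_eq_flatMap]
        rfl

lemma conc_eq_iter (k : Nat) : ∀ (strings originals : List String) (n : Int),
    n.toNat = k → 1 ≤ n → string_conc strings originals n = string_conc_alt strings originals n := by
  induction k with
  | zero => intro _ _ n hk hn; omega
  | succ k ih =>
    intro strings originals n hk hn
    rw [string_conc]
    by_cases h1 : n = 1
    · subst h1
      simp [string_conc_alt]
    · have h2 : 2 ≤ n := by omega
      rw [if_neg (by simpa using h1), if_neg (by omega)]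
      simp only
      rw [newStrs_eq_step]
      rw [ih (pvStep originals strings) originals (n - 1) (by omega) (by omega)]
      unfold string_conc_alt
      have : (n - 1).toNat = (n - 1 - 1).toNat + 1 := by omega
      rw [this, Function.iterate_succ_apply]

-- ===== VERDICT (by name: the statement is the Claim_ definition above) =====
theorem string_conc_spec : Claim_equal_string_conc := by
  intro strings originals n _ hpre
  unfold Spec_string_conc
  exact conc_eq_iter n.toNat strings originals n rfl hpre
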